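-- pv_equiv track=rewrite | github.com/yohokuno/neural_ime | decode_both.py | create_lattice
-- ===== SOURCE A (Python) =====
-- def create_lattice(input_, dictionary):
--     lattice = [[[] for _ in range(len(input_) + 1)] for _ in range(len(input_) + 2)]
--     _, unk_id = dictionary['_UNK'][0]
--
--     for i in range(1, len(input_) + 1):
--         for j in range(i):
--             source = input_[j:i]
--             if source in dictionary:
--                 for target, word_id in dictionary[source]:
--                     lattice[i][j].append((target, source, word_id))
--             elif len(source) == 1:
--                 # Create _UNK node with verbatim target when single character key is not found in the dictionary.
--                 lattice[i][j].append((source, source, unk_id))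
--
--     _, eos_id = dictionary['_EOS'][0]
--     lattice[-1][-1].append(('_EOS', '_EOS', eos_id))
--     return lattice
-- ===== SOURCE B (Python) =====
-- def create_lattice(input_, dictionary):
--     n = len(input_)
--     lattice = [[[] for _ in range(n + 1)] for _ in range(n + 2)]
--     unk_id = dictionary['_UNK'][0][1]
--
--     # Pass 1: for every dictionary key, stamp its entries at every occurrence in input_.
--     for key, entries in dictionary.items():
--         k = len(key)
--         if 0 < k <= n:
--             for j in range(n - k + 1):
--                 if input_[j:j + k] == key:
--                     cell = lattice[j + k][j]
--                     for target, word_id in entries: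
--                         cell.append((target, key, word_id))
--
--     # Pass 2: _UNK fallback for single characters absent from the dictionary.
--     for j in range(n):
--         if input_[j] not in dictionary:
--             lattice[j + 1][j].append((input_[j], input_[j], unk_id))
--
--     eos_id = dictionary['_EOS'][0][1]
--     lattice[n + 1][n].append(('_EOS', '_EOS', eos_id))
--     return lattice
-- ===== Notes on version B (the rewrite author's own statement) =====
-- stated objective: alternative
-- what changed: B builds the lattice by iterating over the dictionary's entries (stamping each key at every occurrence in the input) plus a separate single-character _UNK pass, instead of A's nested loop over all O(n^2) input substrings with a dictionary lookup per substring.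
import Mathlib
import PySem

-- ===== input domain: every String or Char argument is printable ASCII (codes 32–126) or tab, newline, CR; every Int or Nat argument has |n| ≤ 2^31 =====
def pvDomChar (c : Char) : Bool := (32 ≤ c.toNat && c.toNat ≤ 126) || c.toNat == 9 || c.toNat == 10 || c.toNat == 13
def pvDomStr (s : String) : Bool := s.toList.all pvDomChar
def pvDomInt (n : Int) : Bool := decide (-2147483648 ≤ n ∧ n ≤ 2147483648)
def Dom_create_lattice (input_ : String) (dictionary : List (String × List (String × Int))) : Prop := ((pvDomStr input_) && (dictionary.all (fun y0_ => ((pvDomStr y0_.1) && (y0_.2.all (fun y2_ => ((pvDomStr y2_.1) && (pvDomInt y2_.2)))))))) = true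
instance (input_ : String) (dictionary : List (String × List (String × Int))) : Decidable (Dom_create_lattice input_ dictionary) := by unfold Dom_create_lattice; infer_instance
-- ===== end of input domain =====

-- B builds the lattice by iterating over the dictionary's entries (one pass per key, stamping it at every
-- occurrence in the input) plus a single-character _UNK pass, instead of A's loop over all substrings with a
-- lookup per substring; equivalence of the RETURN value is proved (neither mutates its arguments).

-- shared dict primitives: first-match association-list lookup (the task's dict convention)
def pvLookup (d : List (String × List (String × Int))) (key : String) : Option (List (String × Int)) :=
  (d.find? (fun p => p.1 == key)).map (fun p => p.2)

-- `_, x_id = dictionary[key][0]`; the default 0 is unreachable under Pre_ (Python raises there)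
def pvFirstId (d : List (String × List (String × Int))) (key : String) : Int :=
  match pvLookup d key with
  | some ((_, i) :: _) => i
  | _ => 0

-- `lattice[i][j].append(xs...)` (functional: out-of-range modify is a no-op; all uses are in range)
def pvAppendAt {γ : Type} (lat : List (List (List γ))) (i j : Nat) (xs : List γ) : List (List (List γ)) :=
  lat.modify i (fun row => row.modify j (fun cell => cell ++ xs))

-- ===== PORT A =====
def create_lattice (input_ : String) (dictionary : List (String × List (String × Int))) : List (List (List (String × String × Int))) :=
  let s := input_.toList
  let n := s.length
  let lattice0 := List.replicate (n + 2) (List.replicate (n + 1) ([] : List (String × String × Int)))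
  let unk_id := pvFirstId dictionary "_UNK"
  let lattice :=
    (List.range' 1 n).foldl (fun lat i =>
      (List.range i).foldl (fun lat j =>
        -- source = input_[j:i]; exact as drop/take since 0 ≤ j < i
        let src := (s.drop j).take (i - j)
        match pvLookup dictionary (String.ofList src) with
        | some entries =>
            pvAppendAt lat i j (entries.map (fun e => (e.1, String.ofList src, e.2)))
        | none =>
            if src.length = 1 then
              pvAppendAt lat i j [(String.ofList src, String.ofList src, unk_id)]
            else lat) lat) lattice0
  let eos_id := pvFirstId dictionary "_EOS"
  -- lattice[-1][-1]: the lattice always has n+2 rows of n+1 cells, so this is cell (n+1, n)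
  pvAppendAt lattice (n + 1) n [("_EOS", "_EOS", eos_id)]

-- ===== PORT B =====
def create_lattice_alt (input_ : String) (dictionary : List (String × List (String × Int))) : List (List (List (String × String × Int))) :=
  let s := input_.toList
  let n := s.length
  let lattice0 := List.replicate (n + 2) (List.replicate (n + 1) ([] : List (String × String × Int)))
  let unk_id := pvFirstId dictionary "_UNK"
  -- Pass 1: for every dictionary item, stamp its entries at every occurrence of the key in the input
  let lat1 :=
    dictionary.foldl (fun lat kv =>
      let kL := kv.1.toList
      let k := kL.length
      if 0 < k ∧ k ≤ n then
        (List.range (n - k + 1)).foldl (fun lat j =>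
          if (s.drop j).take k = kL then
            pvAppendAt lat (j + k) j (kv.2.map (fun e => (e.1, kv.1, e.2)))
          else lat) lat
      else lat) lattice0
  -- Pass 2: _UNK fallback for single characters absent from the dictionary
  let lat2 :=
    (List.range n).foldl (fun lat j =>
      let c := String.ofList ((s.drop j).take 1)
      match pvLookup dictionary c with
      | some _ => lat
      | none => pvAppendAt lat (j + 1) j [(c, c, unk_id)]) lat1
  let eos_id := pvFirstId dictionary "_EOS"
  pvAppendAt lat2 (n + 1) n [("_EOS", "_EOS", eos_id)]

-- ===== PRECONDITION & SPEC =====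
-- Pre_ excludes (a) inputs where A raises (KeyError/IndexError: '_UNK' or '_EOS' missing or bound to an empty
-- list) and (b) association lists with duplicate keys, which cannot arise from a Python dict (there the
-- first-match lookup convention vs. B's per-item iteration is an artefact of the encoding, not of A or B).
def Pre_create_lattice (input_ : String) (dictionary : List (String × List (String × Int))) : Prop :=
  (pvLookup dictionary "_UNK").getD [] ≠ [] ∧ (pvLookup dictionary "_EOS").getD [] ≠ [] ∧
    (dictionary.map Prod.fst).Nodup

instance (input_ : String) (dictionary : List (String × List (String × Int))) : Decidable (Pre_create_lattice input_ dictionary) := by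
  unfold Pre_create_lattice; infer_instance

def pvWitness_create_lattice : String × (List (String × List (String × Int))) :=
  ("ab", [("_UNK", [("u", 0)]), ("_EOS", [("e", 1)]), ("a", [("A", 2)])])

def Spec_create_lattice (input_ : String) (dictionary : List (String × List (String × Int))) (out : List (List (List (String × String × Int)))) : Prop := out = create_lattice_alt input_ dictionary
instance (input_ : String) (dictionary : List (String × List (String × Int))) (out : List (List (List (String × String × Int)))) : Decidable (Spec_create_lattice input_ dictionary out) := by unfold Spec_create_lattice; infer_instance

-- ===== CLAIM (what is proved, stated in full; the proofs are below) =====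
def Claim_equal_create_lattice : Prop := ∀ (input_ : String) (dictionary : List (String × List (String × Int))), Dom_create_lattice input_ dictionary → Pre_create_lattice input_ dictionary → Spec_create_lattice input_ dictionary (create_lattice input_ dictionary)

-- ===== LEMMAS AND PROOFS =====

-- a lattice update plan: each op (i, j, xs) appends xs to cell (i, j)
def pvApplyOps {γ : Type} (lat : List (List (List γ))) (ops : List (Nat × Nat × List γ)) : List (List (List γ)) :=
  ops.foldl (fun l o => pvAppendAt l o.1 o.2.1 o.2.2) lat

def pvRowApply {γ : Type} (row : List (List γ)) (ops : List (Nat × List γ)) : List (List γ) :=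
  ops.foldl (fun r o => r.modify o.1 (fun cell => cell ++ o.2)) row

-- everything a plan appends to cell (i, j), in order
def pvFlat {γ : Type} (ops : List (Nat × Nat × List γ)) (i j : Nat) : List γ :=
  (ops.filter (fun o => o.1 == i && o.2.1 == j)).flatMap (fun o => o.2.2)

theorem pvAppendAt_nil {γ : Type} (lat : List (List (List γ))) (i j : Nat) :
    pvAppendAt lat i j ([] : List γ) = lat := by
  unfold pvAppendAt
  have h0 : (fun (cell : List γ) => cell ++ ([] : List γ)) = id :=
    funext fun c => List.append_nil c
  have h1 : (fun (row : List (List γ)) => row.modify j fun cell => cell ++ ([] : List γ)) = id := by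
    funext row
    rw [h0, List.modify_id]
    rfl
  rw [h1, List.modify_id]

theorem pvApplyOps_append {γ : Type} (lat : List (List (List γ))) (o₁ o₂ : List (Nat × Nat × List γ)) :
    pvApplyOps lat (o₁ ++ o₂) = pvApplyOps (pvApplyOps lat o₁) o₂ :=
  List.foldl_append

theorem pvApplyOps_flatMap {α γ : Type} (l : List α) (f : α → List (Nat × Nat × List γ)) (lat : List (List (List γ))) :
    pvApplyOps lat (l.flatMap f) = l.foldl (fun acc x => pvApplyOps acc (f x)) lat := by
  induction l generalizing lat with
  | nil => rfl
  | cons a l ih => rw [List.flatMap_cons, pvApplyOps_append, List.foldl_cons, ih]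

theorem pvApplyOps_getElem? {γ : Type} (ops : List (Nat × Nat × List γ)) (lat : List (List (List γ))) (i : Nat) :
    (pvApplyOps lat ops)[i]? =
      (lat[i]?).map (fun row => pvRowApply row ((ops.filter (fun o => o.1 == i)).map (fun o => o.2))) := by
  induction ops generalizing lat with
  | nil =>
    show lat[i]? = _
    cases h : lat[i]? <;> simp [h, pvRowApply]
  | cons o ops ih =>
    show (pvApplyOps (pvAppendAt lat o.1 o.2.1 o.2.2) ops)[i]? = _
    rw [ih]
    unfold pvAppendAt
    rw [List.getElem?_modify]
    by_cases h : o.1 = i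
    · subst h
      cases lat[o.1]? <;> simp [pvRowApply]
    · have hb : (o.1 == i) = false := by simp [h]
      cases lat[i]? <;> simp [h, hb]

theorem pvRowApply_getElem? {γ : Type} (ops : List (Nat × List γ)) (row : List (List γ)) (j : Nat) :
    (pvRowApply row ops)[j]? =
      (row[j]?).map (fun cell => cell ++ (ops.filter (fun o => o.1 == j)).flatMap (fun o => o.2)) := by
  induction ops generalizing row with
  | nil =>
    show row[j]? = _
    cases h : row[j]? <;> simp [h]
  | cons o ops ih =>
    show (pvRowApply (row.modify o.1 (fun cell => cell ++ o.2)) ops)[j]? = _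
    rw [ih, List.getElem?_modify]
    by_cases h : o.1 = j
    · subst h
      cases row[o.1]? <;> simp
    · have hb : (o.1 == j) = false := by simp [h]
      cases row[j]? <;> simp [h, hb]

theorem pvFlat_convert {γ : Type} (ops : List (Nat × Nat × List γ)) (i j : Nat) :
    (((ops.filter (fun o => o.1 == i)).map (fun o => o.2)).filter (fun o => o.1 == j)).flatMap (fun o => o.2) =
      pvFlat ops i j := by
  induction ops with
  | nil => rfl
  | cons o ops ih =>
    unfold pvFlat
    by_cases h1 : o.1 = i <;> by_cases h2 : o.2.1 = j <;>
      simp_all [pvFlat, List.filter_cons]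

theorem pvApplyOps_ext {γ : Type} (lat : List (List (List γ))) (ops₁ ops₂ : List (Nat × Nat × List γ))
    (h : ∀ i j, pvFlat ops₁ i j = pvFlat ops₂ i j) :
    pvApplyOps lat ops₁ = pvApplyOps lat ops₂ := by
  apply List.ext_getElem?
  intro i
  rw [pvApplyOps_getElem?, pvApplyOps_getElem?]
  cases hrow : lat[i]? with
  | none => rfl
  | some row =>
    simp only [Option.map_some]
    congr 1
    apply List.ext_getElem?
    intro j
    rw [pvRowApply_getElem?, pvRowApply_getElem?]
    cases row[j]? with
    | none => rfl
    | some cell =>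
      simp only [Option.map_some]
      congr 1
      rw [pvFlat_convert, pvFlat_convert, h]

theorem pvFlat_append {γ : Type} (o₁ o₂ : List (Nat × Nat × List γ)) (i j : Nat) :
    pvFlat (o₁ ++ o₂) i j = pvFlat o₁ i j ++ pvFlat o₂ i j := by
  simp [pvFlat, List.filter_append]

theorem pvFlat_singleton {γ : Type} (a b : Nat) (xs : List γ) (i j : Nat) :
    pvFlat [(a, b, xs)] i j = if a = i ∧ b = j then xs else [] := by
  by_cases h1 : a = i <;> by_cases h2 : b = j <;> simp [pvFlat, List.filter_cons, h1, h2]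

theorem pvFlat_flatMap {α γ : Type} (l : List α) (f : α → List (Nat × Nat × List γ)) (i j : Nat) :
    pvFlat (l.flatMap f) i j = l.flatMap (fun x => pvFlat (f x) i j) := by
  induction l with
  | nil => rfl
  | cons a l ih => rw [List.flatMap_cons, pvFlat_append, ih, List.flatMap_cons]

theorem pvFlat_map_range {γ : Type} (m : Nat) (g : Nat → Nat) (h : Nat → List γ) (i j : Nat) :
    pvFlat ((List.range m).map (fun t => (g t, t, h t))) i j = if j < m ∧ g j = i then h j else [] := by
  induction m with
  | zero => simp [pvFlat]
  | succ m ih =>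
    rw [List.range_succ, List.map_append, pvFlat_append, ih, List.map_singleton, pvFlat_singleton]
    by_cases hj : j = m
    · subst hj
      rw [if_neg (fun hc => Nat.lt_irrefl j hc.1), List.nil_append]
      by_cases hg : g j = i
      · rw [if_pos ⟨hg, rfl⟩, if_pos ⟨Nat.lt_succ_self j, hg⟩]
      · rw [if_neg (fun hc => hg hc.1), if_neg (fun hc => hg hc.2)]
    · have h2 : (if g m = i ∧ m = j then h m else []) = [] := if_neg (fun hc => hj hc.2.symm)
      rw [h2, List.append_nil]
      exact if_congr (Iff.intro (fun hc => ⟨by omega, hc.2⟩) (fun hc => ⟨by omega, hc.2⟩)) rfl rfl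

theorem pvFlatMap_eq_of_unique {α γ : Type} (l : List α) (f : α → List γ) (x : α)
    (hnd : l.Nodup) (hx : x ∈ l) (hz : ∀ y ∈ l, y ≠ x → f y = []) :
    l.flatMap f = f x := by
  induction l with
  | nil => cases hx
  | cons a l ih =>
    rw [List.flatMap_cons]
    rcases List.mem_cons.mp hx with h | h
    · subst h
      have : l.flatMap f = [] := by
        rw [List.flatMap_eq_nil_iff]
        intro y hy
        exact hz y (List.mem_cons_of_mem _ hy) (fun he => (List.nodup_cons.mp hnd).1 (he ▸ hy))
      rw [this, List.append_nil]
    · have ha : f a = [] := hz a List.mem_cons_self (fun he => (List.nodup_cons.mp hnd).1 (he ▸ h))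
      rw [ha, List.nil_append]
      exact ih (List.nodup_cons.mp hnd).2 h (fun y hy => hz y (List.mem_cons_of_mem _ hy))

-- the per-cell payloads of the two programs
def pvXsA (s : List Char) (d : List (String × List (String × Int))) (unk : Int) (i j : Nat) : List (String × String × Int) :=
  match pvLookup d (String.ofList ((s.drop j).take (i - j))) with
  | some entries => entries.map (fun e => (e.1, String.ofList ((s.drop j).take (i - j)), e.2))
  | none =>
    if ((s.drop j).take (i - j)).length = 1 then
      [(String.ofList ((s.drop j).take (i - j)), String.ofList ((s.drop j).take (i - j)), unk)]
    else []

def pvOpsA (s : List Char) (d : List (String × List (String × Int))) (unk : Int) : List (Nat × Nat × List (String × String × Int)) :=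
  (List.range' 1 s.length).flatMap (fun i => (List.range i).map (fun j => (i, j, pvXsA s d unk i j)))

def pvXsU (s : List Char) (d : List (String × List (String × Int))) (unk : Int) (j : Nat) : List (String × String × Int) :=
  match pvLookup d (String.ofList ((s.drop j).take 1)) with
  | some _ => []
  | none => [(String.ofList ((s.drop j).take 1), String.ofList ((s.drop j).take 1), unk)]

def pvOpsB (s : List Char) (d : List (String × List (String × Int))) (unk : Int) : List (Nat × Nat × List (String × String × Int)) :=
  (d.flatMap (fun kv =>
    if 0 < kv.1.toList.length ∧ kv.1.toList.length ≤ s.length then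
      (List.range (s.length - kv.1.toList.length + 1)).map (fun t =>
        (t + kv.1.toList.length, t,
          if (s.drop t).take kv.1.toList.length = kv.1.toList then kv.2.map (fun e => (e.1, kv.1, e.2)) else []))
    else []))
  ++ (List.range s.length).map (fun t => (t + 1, t, pvXsU s d unk t))

-- A's loop body appends exactly pvXsA (appending [] is the identity)
theorem pvStepA (s : List Char) (d : List (String × List (String × Int))) (unk : Int) (i j : Nat)
    (lat : List (List (List (String × String × Int)))) :
    (match pvLookup d (String.ofList ((s.drop j).take (i - j))) with
     | some entries => pvAppendAt lat i j (entries.map (fun e => (e.1, String.ofList ((s.drop j).take (i - j)), e.2)))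
     | none =>
       if ((s.drop j).take (i - j)).length = 1 then
         pvAppendAt lat i j [(String.ofList ((s.drop j).take (i - j)), String.ofList ((s.drop j).take (i - j)), unk)]
       else lat)
    = pvAppendAt lat i j (pvXsA s d unk i j) := by
  cases hl : pvLookup d (String.ofList ((s.drop j).take (i - j))) with
  | some entries => simp only [pvXsA, hl]
  | none =>
    simp only [pvXsA, hl]
    by_cases h : ((s.drop j).take (i - j)).length = 1
    · rw [if_pos h, if_pos h]
    · rw [if_neg h, if_neg h, pvAppendAt_nil]

-- B's pass-2 body appends exactly pvXsU
theorem pvStepU (s : List Char) (d : List (String × List (String × Int))) (unk : Int) (j : Nat)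
    (lat : List (List (List (String × String × Int)))) :
    (match pvLookup d (String.ofList ((s.drop j).take 1)) with
     | some _ => lat
     | none => pvAppendAt lat (j + 1) j
         [(String.ofList ((s.drop j).take 1), String.ofList ((s.drop j).take 1), unk)])
    = pvAppendAt lat (j + 1) j (pvXsU s d unk j) := by
  cases hl : pvLookup d (String.ofList ((s.drop j).take 1)) with
  | some entries => simp only [pvXsU, hl, pvAppendAt_nil]
  | none => simp only [pvXsU, hl]

-- bridge: port A is its op plan applied
theorem pvBridgeA (input_ : String) (d : List (String × List (String × Int))) :
    create_lattice input_ d =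
      pvApplyOps
        (List.replicate (input_.toList.length + 2) (List.replicate (input_.toList.length + 1) ([] : List (String × String × Int))))
        (pvOpsA input_.toList d (pvFirstId d "_UNK") ++ [(input_.toList.length + 1, input_.toList.length, [("_EOS", "_EOS", pvFirstId d "_EOS")])]) := by
  unfold create_lattice pvOpsA
  rw [pvApplyOps_append]
  refine congrArg (fun L => pvAppendAt L (input_.toList.length + 1) input_.toList.length
    [("_EOS", "_EOS", pvFirstId d "_EOS")]) ?_
  rw [pvApplyOps_flatMap]
  apply PySem.List.foldl_congr_mem
  intro lat i _
  rw [pvApplyOps, List.foldl_map]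
  apply PySem.List.foldl_congr_mem
  intro lat' j _
  exact pvStepA input_.toList d (pvFirstId d "_UNK") i j lat'

-- bridge: port B is its op plan applied
theorem pvBridgeB (input_ : String) (d : List (String × List (String × Int))) :
    create_lattice_alt input_ d =
      pvApplyOps
        (List.replicate (input_.toList.length + 2) (List.replicate (input_.toList.length + 1) ([] : List (String × String × Int))))
        (pvOpsB input_.toList d (pvFirstId d "_UNK") ++ [(input_.toList.length + 1, input_.toList.length, [("_EOS", "_EOS", pvFirstId d "_EOS")])]) := by
  unfold create_lattice_alt pvOpsB
  rw [pvApplyOps_append, pvApplyOps_append]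
  refine congrArg (fun L => pvAppendAt L (input_.toList.length + 1) input_.toList.length
    [("_EOS", "_EOS", pvFirstId d "_EOS")]) ?_
  have hpass1 :
      d.foldl (fun lat kv =>
        if 0 < kv.1.toList.length ∧ kv.1.toList.length ≤ input_.toList.length then
          (List.range (input_.toList.length - kv.1.toList.length + 1)).foldl (fun lat j =>
            if (input_.toList.drop j).take kv.1.toList.length = kv.1.toList then
              pvAppendAt lat (j + kv.1.toList.length) j (kv.2.map (fun e => (e.1, kv.1, e.2)))
            else lat) lat
        else lat)
        (List.replicate (input_.toList.length + 2) (List.replicate (input_.toList.length + 1) ([] : List (String × String × Int)))) =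
      pvApplyOps
        (List.replicate (input_.toList.length + 2) (List.replicate (input_.toList.length + 1) ([] : List (String × String × Int))))
        (d.flatMap (fun kv =>
          if 0 < kv.1.toList.length ∧ kv.1.toList.length ≤ input_.toList.length then
            (List.range (input_.toList.length - kv.1.toList.length + 1)).map (fun t =>
              (t + kv.1.toList.length, t,
                if (input_.toList.drop t).take kv.1.toList.length = kv.1.toList then kv.2.map (fun e => (e.1, kv.1, e.2)) else []))
          else [])) := by
    rw [pvApplyOps_flatMap]
    apply PySem.List.foldl_congr_mem
    intro lat kv _
    by_cases hg : 0 < kv.1.toList.length ∧ kv.1.toList.length ≤ input_.toList.length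
    · rw [if_pos hg, if_pos hg, pvApplyOps, List.foldl_map]
      apply PySem.List.foldl_congr_mem
      intro lat' j _
      by_cases hm : (input_.toList.drop j).take kv.1.toList.length = kv.1.toList
      · rw [if_pos hm, if_pos hm]
      · rw [if_neg hm, if_neg hm, pvAppendAt_nil]
    · rw [if_neg hg, if_neg hg]
      rfl
  rw [← hpass1]
  rw [pvApplyOps, List.foldl_map]
  apply PySem.List.foldl_congr_mem
  intro lat j _
  exact pvStepU input_.toList d (pvFirstId d "_UNK") j lat

-- characterisation of A's plan per cell
theorem pvFlatA (s : List Char) (d : List (String × List (String × Int))) (unk : Int) (i j : Nat) :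
    pvFlat (pvOpsA s d unk) i j = if 1 ≤ i ∧ i ≤ s.length ∧ j < i then pvXsA s d unk i j else [] := by
  unfold pvOpsA
  rw [pvFlat_flatMap]
  by_cases hi : 1 ≤ i ∧ i ≤ s.length
  · have hmem : i ∈ List.range' 1 s.length := by
      rw [List.mem_range'_1]; omega
    rw [pvFlatMap_eq_of_unique _ _ i (List.nodup_range' 1 Nat.one_pos) hmem
      (fun y _ hy => by rw [pvFlat_map_range]; exact if_neg (fun hc => hy hc.2))]
    rw [pvFlat_map_range]
    by_cases hj : j < i
    · rw [if_pos ⟨hj, rfl⟩, if_pos ⟨hi.1, hi.2, hj⟩]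
    · rw [if_neg (fun hc => hj hc.1), if_neg (fun hc => hj hc.2.2)]
  · have hz : ∀ y ∈ List.range' 1 s.length,
        pvFlat ((List.range y).map (fun t => (y, t, pvXsA s d unk y t))) i j = [] := by
      intro y hmem
      rw [List.mem_range'_1] at hmem
      rw [pvFlat_map_range]
      exact if_neg (fun hc => hi ⟨by omega, by omega⟩)
    rw [List.flatMap_eq_nil_iff.mpr hz]
    exact (if_neg (fun hc => hi ⟨hc.1, hc.2.1⟩)).symm

-- inside the admitted region the slice really has length i - j
theorem pvSrc_length (s : List Char) (i j : Nat) (hin : i ≤ s.length) :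
    ((s.drop j).take (i - j)).length = i - j := by
  rw [List.length_take, List.length_drop]
  omega

-- per-cell agreement of the two plans, given unique keys
theorem pvCells_eq (s : List Char) (d : List (String × List (String × Int))) (unk : Int)
    (hnd : (d.map Prod.fst).Nodup) (i j : Nat) :
    pvFlat (pvOpsA s d unk) i j = pvFlat (pvOpsB s d unk) i j := by
  rw [pvFlatA]
  unfold pvOpsB
  rw [pvFlat_append, pvFlat_flatMap, pvFlat_map_range]
  have hdict : ∀ kv ∈ d,
      pvFlat (if 0 < kv.1.toList.length ∧ kv.1.toList.length ≤ s.length then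
        (List.range (s.length - kv.1.toList.length + 1)).map (fun t =>
          (t + kv.1.toList.length, t,
            if (s.drop t).take kv.1.toList.length = kv.1.toList then kv.2.map (fun e => (e.1, kv.1, e.2)) else []))
        else []) i j =
      if 0 < kv.1.toList.length ∧ kv.1.toList.length ≤ s.length ∧ j + kv.1.toList.length = i ∧ j + kv.1.toList.length ≤ s.length
      then (if (s.drop j).take kv.1.toList.length = kv.1.toList then kv.2.map (fun e => (e.1, kv.1, e.2)) else [])
      else [] := by
    intro kv _
    by_cases hg : 0 < kv.1.toList.length ∧ kv.1.toList.length ≤ s.length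
    · rw [if_pos hg, pvFlat_map_range]
      by_cases hc : j < s.length - kv.1.toList.length + 1 ∧ j + kv.1.toList.length = i
      · rw [if_pos hc]
        have hbig : 0 < kv.1.toList.length ∧ kv.1.toList.length ≤ s.length ∧ j + kv.1.toList.length = i ∧ j + kv.1.toList.length ≤ s.length :=
          ⟨hg.1, hg.2, hc.2, by omega⟩
        exact (if_pos hbig).symm
      · rw [if_neg hc]
        have hbig : ¬(0 < kv.1.toList.length ∧ kv.1.toList.length ≤ s.length ∧ j + kv.1.toList.length = i ∧ j + kv.1.toList.length ≤ s.length) :=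
          fun hcc => hc ⟨by omega, hcc.2.2.1⟩
        exact (if_neg hbig).symm
    · rw [if_neg hg]
      have hbig : ¬(0 < kv.1.toList.length ∧ kv.1.toList.length ≤ s.length ∧ j + kv.1.toList.length = i ∧ j + kv.1.toList.length ≤ s.length) :=
        fun hcc => hg ⟨hcc.1, hcc.2.1⟩
      rw [if_neg hbig]
      rfl
  by_cases hreg : 1 ≤ i ∧ i ≤ s.length ∧ j < i
  · obtain ⟨hi1, hin, hij⟩ := hreg
    rw [if_pos ⟨hi1, hin, hij⟩]
    have hlen := pvSrc_length s i j hin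
    cases hfind : d.find? (fun p => p.1 == String.ofList ((s.drop j).take (i - j))) with
    | some kv0 =>
      have hkey : kv0.1 = String.ofList ((s.drop j).take (i - j)) := by
        have hb := List.find?_some hfind
        simp only [beq_iff_eq] at hb
        exact hb
      have hmem0 : kv0 ∈ d := List.mem_of_find?_eq_some hfind
      have hk0 : kv0.1.toList = (s.drop j).take (i - j) := by rw [hkey, String.toList_ofList]
      have hkl : kv0.1.toList.length = i - j := by rw [hk0, hlen]
      have hlook : pvLookup d (String.ofList ((s.drop j).take (i - j))) = some kv0.2 := by
        unfold pvLookup; rw [hfind]; rfl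
      have hother : ∀ kv ∈ d, kv ≠ kv0 →
          pvFlat (if 0 < kv.1.toList.length ∧ kv.1.toList.length ≤ s.length then
            (List.range (s.length - kv.1.toList.length + 1)).map (fun t =>
              (t + kv.1.toList.length, t,
                if (s.drop t).take kv.1.toList.length = kv.1.toList then kv.2.map (fun e => (e.1, kv.1, e.2)) else []))
            else []) i j = [] := by
        intro kv hm hne
        rw [hdict kv hm]
        by_cases hg : 0 < kv.1.toList.length ∧ kv.1.toList.length ≤ s.length ∧ j + kv.1.toList.length = i ∧ j + kv.1.toList.length ≤ s.length
        · rw [if_pos hg]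
          by_cases hmt : (s.drop j).take kv.1.toList.length = kv.1.toList
          · exfalso
            have h1 : kv.1.toList.length = i - j := by omega
            have h2 : kv.1.toList = (s.drop j).take (i - j) := by rw [← hmt, h1]
            have h3 : kv.1 = kv0.1 := by rw [hkey, ← h2, String.ofList_toList]
            exact hne (List.inj_on_of_nodup_map hnd hm hmem0 h3)
          · rw [if_neg hmt]
        · rw [if_neg hg]
      rw [pvFlatMap_eq_of_unique _ _ kv0 (List.Nodup.of_map _ hnd) hmem0 hother]
      rw [hdict kv0 hmem0]
      have hbig : 0 < kv0.1.toList.length ∧ kv0.1.toList.length ≤ s.length ∧ j + kv0.1.toList.length = i ∧ j + kv0.1.toList.length ≤ s.length := by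
        rw [hkl]; omega
      rw [if_pos hbig]
      have hmatch : (s.drop j).take kv0.1.toList.length = kv0.1.toList := by rw [hkl, hk0]
      rw [if_pos hmatch]
      simp only [pvXsA, hlook]
      rw [← hkey]
      by_cases h1 : j < s.length ∧ j + 1 = i
      · have hone : (s.drop j).take 1 = (s.drop j).take (i - j) := by rw [show i - j = 1 by omega]
        have hxu : pvXsU s d unk j = [] := by simp only [pvXsU, hone, hlook]
        rw [if_pos h1, hxu, List.append_nil]
      · rw [if_neg h1, List.append_nil]
    | none =>
      have hlook : pvLookup d (String.ofList ((s.drop j).take (i - j))) = none := by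
        unfold pvLookup; rw [hfind]; rfl
      have hz : ∀ kv ∈ d,
          pvFlat (if 0 < kv.1.toList.length ∧ kv.1.toList.length ≤ s.length then
            (List.range (s.length - kv.1.toList.length + 1)).map (fun t =>
              (t + kv.1.toList.length, t,
                if (s.drop t).take kv.1.toList.length = kv.1.toList then kv.2.map (fun e => (e.1, kv.1, e.2)) else []))
            else []) i j = [] := by
        intro kv hm
        rw [hdict kv hm]
        by_cases hg : 0 < kv.1.toList.length ∧ kv.1.toList.length ≤ s.length ∧ j + kv.1.toList.length = i ∧ j + kv.1.toList.length ≤ s.length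
        · rw [if_pos hg]
          by_cases hmt : (s.drop j).take kv.1.toList.length = kv.1.toList
          · exfalso
            have h1 : kv.1.toList.length = i - j := by omega
            have h2 : kv.1.toList = (s.drop j).take (i - j) := by rw [← hmt, h1]
            have h3 : (kv.1 == String.ofList ((s.drop j).take (i - j))) = true := by
              rw [← h2, String.ofList_toList]
              exact beq_self_eq_true _
            exact (List.find?_eq_none.mp hfind kv hm) h3
          · rw [if_neg hmt]
        · rw [if_neg hg]
      rw [List.flatMap_eq_nil_iff.mpr hz, List.nil_append]
      simp only [pvXsA, hlook]
      by_cases h1 : ((s.drop j).take (i - j)).length = 1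
      · have hione : i - j = 1 := by rw [hlen] at h1; exact h1
        have h2 : j < s.length ∧ j + 1 = i := ⟨by omega, by omega⟩
        have hone : (s.drop j).take 1 = (s.drop j).take (i - j) := by rw [hione]
        have hxu : pvXsU s d unk j =
            [(String.ofList ((s.drop j).take (i - j)), String.ofList ((s.drop j).take (i - j)), unk)] := by
          simp only [pvXsU, hone, hlook]
        rw [if_pos h1, if_pos h2, hxu]
      · have h2 : ¬(j < s.length ∧ j + 1 = i) := fun hc => h1 (by rw [hlen]; omega)
        rw [if_neg h1, if_neg h2]
  · rw [if_neg hreg]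
    have hz : ∀ kv ∈ d,
        pvFlat (if 0 < kv.1.toList.length ∧ kv.1.toList.length ≤ s.length then
          (List.range (s.length - kv.1.toList.length + 1)).map (fun t =>
            (t + kv.1.toList.length, t,
              if (s.drop t).take kv.1.toList.length = kv.1.toList then kv.2.map (fun e => (e.1, kv.1, e.2)) else []))
          else []) i j = [] := by
      intro kv hm
      rw [hdict kv hm]
      refine if_neg ?_
      intro hcc
      exact hreg ⟨by omega, by omega, by omega⟩
    rw [List.flatMap_eq_nil_iff.mpr hz, List.nil_append,
      if_neg (fun (hc : j < s.length ∧ j + 1 = i) => hreg ⟨by omega, by omega, by omega⟩)]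

-- ===== VERDICT (by name: the statement is the Claim_ definition above) =====
theorem create_lattice_spec : Claim_equal_create_lattice := by
  intro input_ dictionary _ hpre
  show create_lattice input_ dictionary = create_lattice_alt input_ dictionary
  rw [pvBridgeA, pvBridgeB]
  apply pvApplyOps_ext
  intro i j
  rw [pvFlat_append, pvFlat_append,
    pvCells_eq input_.toList dictionary (pvFirstId dictionary "_UNK") hpre.2.2 i j]
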